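-- pv_equiv track=rewrite | github.com/DeconBear/klynx | klynx/agent/utils/formatters.py | format_tool_output
-- ===== SOURCE A (Python) =====
-- def format_tool_output(tool_name: str, output: str) -> str:
--     """
--
--
--     Args:
--         tool_name:
--         output:
--
--     Returns:
--
--     """
--     lines = [
--         f"┌─ : {tool_name}",
--         "│",
--     ]
--
--     for line in output.split('\n'):
--         lines.append(f"│ {line}")
--
--     lines.append("└─")
--
--     return '\n'.join(lines)
-- ===== SOURCE B (Python) =====
-- def format_tool_output(tool_name: str, output: str) -> str:
--     return (
--         f"\u250c\u2500 : {tool_name}\n\u2502\n\u2502 "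
--         + output.replace("\n", "\n\u2502 ")
--         + "\n\u2514\u2500"
--     )
-- ===== Notes on version B (the rewrite author's own statement) =====
-- stated objective: idiomatic
-- what changed: Replaces the split-into-lines loop that appends prefixed lines to a list and joins them with a single string concatenation that prefixes the whole body at once via output.replace('\n', '\n│ ').
import Mathlib
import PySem

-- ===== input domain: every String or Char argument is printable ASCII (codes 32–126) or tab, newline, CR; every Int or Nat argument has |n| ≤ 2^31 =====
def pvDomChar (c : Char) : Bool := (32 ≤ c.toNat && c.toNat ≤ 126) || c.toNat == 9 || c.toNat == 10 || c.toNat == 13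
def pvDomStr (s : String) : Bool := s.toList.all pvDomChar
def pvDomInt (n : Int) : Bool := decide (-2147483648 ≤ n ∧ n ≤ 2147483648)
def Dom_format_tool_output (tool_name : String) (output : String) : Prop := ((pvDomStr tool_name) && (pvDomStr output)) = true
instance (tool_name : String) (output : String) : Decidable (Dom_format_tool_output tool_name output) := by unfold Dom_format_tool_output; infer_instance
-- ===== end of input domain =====

-- B replaces A's split-into-lines/append loop with one string concatenation that
-- prefixes the whole body at once via output.replace("\n", "\n│ ") (idiomatic; same cost).

-- ===== PORT A =====
def format_tool_output (tool_name : String) (output : String) : String :=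
  -- lines = [header, "│"]; for line in output.split('\n'): lines.append("│ " + line);
  -- lines.append("└─"); return '\n'.join(lines)   ("\n" ≠ "", so split? is some)
  PySem.Str.join "\n"
    ((((PySem.Str.split? output "\n").getD []).foldl
        (fun acc line => acc ++ ["│ " ++ line])
        ["┌─ : " ++ tool_name, "│"]) ++ ["└─"])

-- ===== PORT B =====
def format_tool_output_alt (tool_name : String) (output : String) : String :=
  "┌─ : " ++ tool_name ++ "\n│\n│ " ++ PySem.Str.replace output "\n" "\n│ " ++ "\n└─"

-- ===== PRECONDITION & SPEC =====
def Spec_format_tool_output (tool_name : String) (output : String) (out : String) : Prop := out = format_tool_output_alt tool_name output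
instance (tool_name : String) (output : String) (out : String) : Decidable (Spec_format_tool_output tool_name output out) := by unfold Spec_format_tool_output; infer_instance

-- ===== CLAIM (what is proved, stated in full; the proofs are below) =====
def Claim_equal_format_tool_output : Prop := ∀ (tool_name : String) (output : String), Dom_format_tool_output tool_name output → Spec_format_tool_output tool_name output (format_tool_output tool_name output)

-- ===== LEMMAS AND PROOFS =====

-- the body with every '\n' expanded to "\n│ " (what B's replace produces)
def pvBody (cs : List Char) : List Char :=
  cs.flatMap (fun c => if c = '\n' then ['\n', '│', ' '] else [c])

-- A's line splitter, in direct accumulator form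
def pvSplit : List Char → List Char → List (List Char)
  | cur, [] => [cur.reverse]
  | cur, c :: t => if c = '\n' then cur.reverse :: pvSplit [] t else pvSplit (c :: cur) t

theorem pvBody_cons (c : Char) (t : List Char) :
    pvBody (c :: t) = (if c = '\n' then ['\n', '│', ' '] else [c]) ++ pvBody t := by
  simp [pvBody]

theorem go_replace (cs : List Char) : ∀ (fuel : Nat) (acc : List Char), cs.length ≤ fuel →
    PySem.Chars.replace.go ['\n'] ['\n', '│', ' '] fuel cs acc = acc.reverse ++ pvBody cs := by
  induction cs with
  | nil =>
    intro fuel acc _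
    cases fuel <;> simp [PySem.Chars.replace.go, pvBody]
  | cons c t ih =>
    intro fuel acc h
    cases fuel with
    | zero => simp at h
    | succ f =>
      by_cases hc : c = '\n'
      · subst hc
        rw [show PySem.Chars.replace.go ['\n'] ['\n', '│', ' '] (f+1) ('\n' :: t) acc
              = PySem.Chars.replace.go ['\n'] ['\n', '│', ' '] f t
                  (['\n', '│', ' '].reverse ++ acc) from by
            simp [PySem.Chars.replace.go, List.isPrefixOf]]
        rw [ih f _ (by simpa using h), pvBody_cons]
        simp
      · have hpref : List.isPrefixOf ['\n'] (c :: t) = false := by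
          simp [List.isPrefixOf]
          exact fun h => hc h.symm
        rw [show PySem.Chars.replace.go ['\n'] ['\n', '│', ' '] (f+1) (c :: t) acc
              = PySem.Chars.replace.go ['\n'] ['\n', '│', ' '] f t (c :: acc) from by
            simp [PySem.Chars.replace.go, hpref]]
        rw [ih f _ (by simpa using h), pvBody_cons]
        simp [hc]

theorem replace_eq_pvBody (cs : List Char) :
    PySem.Chars.replace cs ['\n'] ['\n', '│', ' '] = pvBody cs := by
  have := go_replace cs cs.length [] (le_refl _)
  simpa [PySem.Chars.replace] using this

theorem go_split (cs : List Char) : ∀ (fuel : Nat) (cur : List Char) (acc : List (List Char)),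
    cs.length ≤ fuel →
    PySem.Chars.splitOn.go ['\n'] fuel cs cur acc = acc.reverse ++ pvSplit cur cs := by
  induction cs with
  | nil =>
    intro fuel cur acc _
    cases fuel <;> simp [PySem.Chars.splitOn.go, pvSplit]
  | cons c t ih =>
    intro fuel cur acc h
    cases fuel with
    | zero => simp at h
    | succ f =>
      by_cases hc : c = '\n'
      · subst hc
        rw [show PySem.Chars.splitOn.go ['\n'] (f+1) ('\n' :: t) cur acc
              = PySem.Chars.splitOn.go ['\n'] f t [] (cur.reverse :: acc) from by
            simp [PySem.Chars.splitOn.go, List.isPrefixOf]]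
        rw [ih f _ _ (by simpa using h)]
        simp [pvSplit]
      · have hpref : List.isPrefixOf ['\n'] (c :: t) = false := by
          simp [List.isPrefixOf]
          exact fun h => hc h.symm
        rw [show PySem.Chars.splitOn.go ['\n'] (f+1) (c :: t) cur acc
              = PySem.Chars.splitOn.go ['\n'] f t (c :: cur) acc from by
            simp [PySem.Chars.splitOn.go, hpref]]
        rw [ih f _ _ (by simpa using h)]
        simp [pvSplit, hc]

theorem splitOn_eq_pvSplit (cs : List Char) :
    PySem.Chars.splitOn cs ['\n'] = pvSplit [] cs := by
  have := go_split cs (cs.length + 1) [] [] (by omega)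
  simpa [PySem.Chars.splitOn] using this

theorem joinNl (l : List (List Char)) : ∀ (a : List Char),
    PySem.Chars.join ['\n'] (a :: l) = a ++ l.flatMap (fun x => '\n' :: x) := by
  induction l with
  | nil => intro a; simp [PySem.Chars.join_singleton]
  | cons b l ih =>
    intro a
    rw [PySem.Chars.join_cons_cons, ih b]
    simp

theorem splitFlat (cs : List Char) : ∀ (cur : List Char),
    (pvSplit cur cs).flatMap (fun x => '\n' :: ('│' :: ' ' :: x))
      = '\n' :: '│' :: ' ' :: (cur.reverse ++ pvBody cs) := by
  induction cs with
  | nil => intro cur; simp [pvSplit, pvBody]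
  | cons c t ih =>
    intro cur
    by_cases hc : c = '\n'
    · subst hc
      rw [show pvSplit cur ('\n' :: t) = cur.reverse :: pvSplit [] t from by simp [pvSplit]]
      rw [List.flatMap_cons, ih, pvBody_cons]
      simp
    · rw [show pvSplit cur (c :: t) = pvSplit (c :: cur) t from by simp [pvSplit, hc]]
      rw [ih, pvBody_cons]
      simp [hc]

theorem foldl_append_map (ls : List String) : ∀ (init : List String),
    ls.foldl (fun acc line => acc ++ ["│ " ++ line]) init
      = init ++ ls.map (fun line => "│ " ++ line) := by
  induction ls with
  | nil => intro init; simp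
  | cons x xs ih => intro init; simp [List.foldl_cons, ih]

-- ===== VERDICT (by name: the statement is the Claim_ definition above) =====
theorem format_tool_output_spec : Claim_equal_format_tool_output := by
  intro tool_name output _
  unfold Spec_format_tool_output format_tool_output format_tool_output_alt
  rw [← String.toList_inj]
  rw [foldl_append_map]
  rw [String.toList_append, String.toList_append, String.toList_append, String.toList_append]
  rw [PySem.Str.toList_join, PySem.Str.toList_replace]
  have hsplit : (PySem.Str.split? output "\n").getD []
      = (PySem.Chars.splitOn output.toList ['\n']).map String.ofList := by
    simp [PySem.Str.split?, PySem.Chars.split?]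
  rw [hsplit, splitOn_eq_pvSplit]
  rw [show PySem.Chars.replace output.toList "\n".toList "\n│ ".toList
        = pvBody output.toList from replace_eq_pvBody output.toList]
  have hg : (String.toList ∘ (fun line => "│ " ++ line) ∘ String.ofList)
      = fun x : List Char => '│' :: ' ' :: x := by
    funext x
    show ("│ " ++ String.ofList x).toList = '│' :: ' ' :: x
    simp [String.toList_append, String.toList_ofList]
  simp only [List.map_append, List.map_cons, List.map_map, List.map_nil, hg]
  rw [show ("\n".toList) = ['\n'] from rfl]
  rw [show [("┌─ : " ++ tool_name).toList, "│".toList]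
        ++ (pvSplit [] output.toList).map (fun x : List Char => '│' :: ' ' :: x) ++ ["└─".toList]
      = ("┌─ : " ++ tool_name).toList
        :: ("│".toList :: ((pvSplit [] output.toList).map (fun x : List Char => '│' :: ' ' :: x)
              ++ ["└─".toList])) from by simp]
  rw [joinNl]
  rw [List.flatMap_cons, List.flatMap_append, List.flatMap_map]
  rw [splitFlat]
  simp [String.toList_append, pvBody]
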